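-- pv_equiv track=rewrite | github.com/Nghia03092004/nghia03092004.github.io | project_euler_unified/problem_942/solution.py | build_poly_map
-- ===== SOURCE A (Python) =====
-- from collections import defaultdict, Counter
--
-- def polygonal(s, k):
--     """Compute the k-th s-gonal number: P(s,k) = k*((s-2)*k - (s-4)) / 2."""
--     return k * ((s - 2) * k - (s - 4)) // 2
--
-- def build_poly_map(limit, s_range=range(3, 9)):
--     """Map each polygonal value (up to limit) to its set of s-types."""
--     poly_map = defaultdict(set)
--     for s in s_range:
--         k = 1
--         while True:
--             v = polygonal(s, k)
--             if v > limit: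
--                 break
--             poly_map[v].add(s)
--             k += 1
--     return poly_map
-- ===== SOURCE B (Python) =====
-- from collections import defaultdict
--
-- def polygonal(s, k):
--     return k * ((s - 2) * k - (s - 4)) // 2
--
-- def build_poly_map(limit, s_range=range(3, 9)):
--     """Map each polygonal value (up to limit) to its set of s-types.
--
--     For each s, instead of scanning indices until the value exceeds the
--     limit, find the count K of in-range terms directly: gallop (doubling)
--     to an index whose value exceeds the limit, then binary-search the
--     largest k with polygonal(s, k) <= limit; finally fill the map with a
--     bounded loop over range(1, K+1).
--     """
--     poly_map = defaultdict(set)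
--     for s in s_range:
--         if polygonal(s, 1) > limit:
--             continue
--         hi = 2
--         while polygonal(s, hi) <= limit:
--             hi *= 2
--         lo = 1
--         while hi - lo > 1:
--             mid = (lo + hi) // 2
--             if polygonal(s, mid) <= limit:
--                 lo = mid
--             else:
--                 hi = mid
--         for k in range(1, lo + 1):
--             poly_map[polygonal(s, k)].add(s)
--     return poly_map
-- ===== Notes on version B (the rewrite author's own statement) =====
-- stated objective: alternative
-- what changed: Instead of A's linear scan that evaluates each polygonal index until the value exceeds the limit, B computes the count of in-range terms per shape directly by galloping (doubling) to an out-of-range index and binary-searching the largest in-range index, then fills the map with a bounded for-loop.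
import Mathlib
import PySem

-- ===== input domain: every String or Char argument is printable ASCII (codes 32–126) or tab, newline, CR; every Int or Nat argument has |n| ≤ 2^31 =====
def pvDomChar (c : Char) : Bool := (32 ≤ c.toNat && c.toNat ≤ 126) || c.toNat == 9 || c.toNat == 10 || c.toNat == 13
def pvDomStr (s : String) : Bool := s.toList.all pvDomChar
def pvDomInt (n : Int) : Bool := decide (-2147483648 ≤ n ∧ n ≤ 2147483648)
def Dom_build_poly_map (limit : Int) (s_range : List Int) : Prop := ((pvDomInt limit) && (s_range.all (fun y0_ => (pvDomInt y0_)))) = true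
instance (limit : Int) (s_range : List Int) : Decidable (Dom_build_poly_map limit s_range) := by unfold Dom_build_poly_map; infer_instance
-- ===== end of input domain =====

-- B finds, per s, the number K of in-range terms by doubling + binary search and fills the
-- map with a bounded loop over range(1, K+1), instead of A's linear scan-until-exceed
-- (objective: alternative algorithm, identical exact values and insertion order).


-- ===== PORT A =====
def polygonal (s k : Int) : Int :=
  PySem.Int.floordiv (k * ((s - 2) * k - (s - 4))) 2

-- A's 'while True' inner loop; fuel (limit.toNat + 2) only makes it total: on every input
-- admitted by Pre_ the Python loop breaks before the fuel runs out (P(s,k) ≥ k for s ≥ 2).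
def pvLoopA (limit s : Int) (d : PySem.Dict Int (PySem.Set Int)) (k : Int) :
    Nat → PySem.Dict Int (PySem.Set Int)
  | 0 => d
  | fuel + 1 =>
    let v := polygonal s k
    if v > limit then d
    else pvLoopA limit s (d.modify v PySem.Set.empty (fun st => PySem.Set.add st s)) (k + 1) fuel

def build_poly_map (limit : Int) (s_range : List Int) : List (Int × List Int) :=
  (s_range.foldl (fun d s => pvLoopA limit s d 1 (limit.toNat + 2)) PySem.Dict.empty).items

-- ===== PORT B =====
-- Source B's galloping loop 'while polygonal(s, hi) <= limit: hi *= 2'; fuel only makes it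
-- total: inside Pre_ it terminates before the fuel runs out (polygonal s hi ≥ hi for s ≥ 2).
def pvGallop (limit s hi : Int) : Nat → Int
  | 0 => hi
  | fuel + 1 =>
    if polygonal s hi ≤ limit then pvGallop limit s (hi * 2) fuel else hi

-- Source B's bisection loop 'while hi - lo > 1: …' (terminates unconditionally: mid is strictly
-- between lo and hi).
def pvBisect (limit s lo hi : Int) : Int :=
  if h : hi - lo > 1 then
    let mid := PySem.Int.floordiv (lo + hi) 2
    if polygonal s mid ≤ limit then pvBisect limit s mid hi else pvBisect limit s lo mid
  else lo
termination_by (hi - lo).toNat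
decreasing_by
  all_goals
    have hb := PySem.Int.floordiv_two_mid_bounds (lo := lo + 1) (hi := hi - 1) (by omega)
    have he : PySem.Int.floordiv (lo + 1 + (hi - 1)) 2 = PySem.Int.floordiv (lo + hi) 2 := by
      norm_num
    rw [he] at hb; omega

def build_poly_map_alt (limit : Int) (s_range : List Int) : List (Int × List Int) :=
  (s_range.foldl
    (fun d s =>
      if polygonal s 1 > limit then d
      else
        let hi := pvGallop limit s 2 (limit.toNat + 2)
        let K := pvBisect limit s 1 hi
        (PySem.List.pyRange 1 (K + 1) 1).foldl
          (fun d k => d.modify (polygonal s k) PySem.Set.empty (fun st => PySem.Set.add st s)) d)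
    PySem.Dict.empty).items

-- ===== PRECONDITION & SPEC =====
-- Pre_ excludes exactly the inputs on which Python A never returns: with limit ≥ 1, an
-- s ≤ 1 in s_range makes A's inner loop run forever (polygonal(s,k) stays ≤ 1 ≤ limit).
def Pre_build_poly_map (limit : Int) (s_range : List Int) : Prop :=
  limit ≤ 0 ∨ ∀ s ∈ s_range, 2 ≤ s
instance (limit : Int) (s_range : List Int) : Decidable (Pre_build_poly_map limit s_range) := by
  unfold Pre_build_poly_map; infer_instance

def pvWitness_build_poly_map : Int × List Int := (12, [3, 4, 5])

def Spec_build_poly_map (limit : Int) (s_range : List Int) (out : List (Int × List Int)) : Prop :=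
  out = build_poly_map_alt limit s_range
instance (limit : Int) (s_range : List Int) (out : List (Int × List Int)) :
    Decidable (Spec_build_poly_map limit s_range out) := by
  unfold Spec_build_poly_map; infer_instance

-- ===== CLAIM =====
def Claim_equal_build_poly_map : Prop :=
  ∀ (limit : Int) (s_range : List Int), Dom_build_poly_map limit s_range →
    Pre_build_poly_map limit s_range →
    Spec_build_poly_map limit s_range (build_poly_map limit s_range)

-- ===== LEMMAS AND PROOFS =====

-- the numerator of the closed form is always even
lemma pvEven_num (s k : Int) : ∃ t, k * ((s - 2) * k - (s - 4)) = t + t := by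
  obtain ⟨t, ht⟩ := Int.even_mul_succ_self (k - 1)
  exact ⟨(s - 2) * t + k, by linear_combination (s - 2) * ht⟩

lemma pvPolygonal_one (s : Int) : polygonal s 1 = 1 := by
  unfold polygonal
  have h : 1 * ((s - 2) * 1 - (s - 4)) = 2 := by ring
  rw [h]; decide

lemma pvPolygonal_succ (s k : Int) :
    polygonal s (k + 1) = polygonal s k + ((s - 2) * k + 1) := by
  obtain ⟨t, ht⟩ := pvEven_num s k
  have h2 : (k + 1) * ((s - 2) * (k + 1) - (s - 4)) = (t + ((s - 2) * k + 1)) + (t + ((s - 2) * k + 1)) := by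
    linear_combination ht
  unfold polygonal
  rw [ht, h2, PySem.Int.floordiv_eq_ediv_of_pos (by norm_num),
      PySem.Int.floordiv_eq_ediv_of_pos (by norm_num)]
  omega

lemma pvPolygonal_ge (s k : Int) (hs : 2 ≤ s) (hk : 1 ≤ k) : k ≤ polygonal s k := by
  obtain ⟨t, ht⟩ := pvEven_num s k
  have hnum : 2 * k ≤ t + t := by nlinarith [mul_nonneg (mul_nonneg (by omega : (0:Int) ≤ s - 2) (by omega : (0:Int) ≤ k)) (by omega : (0:Int) ≤ k - 1)]
  unfold polygonal
  rw [ht, PySem.Int.floordiv_eq_ediv_of_pos (by norm_num)]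
  omega

lemma pvPolygonal_mono (s : Int) (hs : 2 ≤ s) {a b : Int} (ha : 1 ≤ a) (hab : a ≤ b) :
    polygonal s a ≤ polygonal s b := by
  obtain ⟨n, hn⟩ : ∃ n : Nat, b = a + (n : Int) := ⟨(b - a).toNat, by omega⟩
  subst hn
  induction n with
  | zero => simp
  | succ m ih =>
    have : (a + (↑(m + 1) : Int)) = (a + (m : Int)) + 1 := by push_cast; ring
    rw [this, pvPolygonal_succ]
    have := ih (by omega)
    nlinarith [this, (by omega : (0:Int) ≤ s - 2), (by omega : (1:Int) ≤ a + (m:Int))]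

-- gallop correctness: result r satisfies polygonal s r > limit and r ≥ hi, given enough fuel
lemma pvGallop_spec (limit s : Int) (hs : 2 ≤ s) :
    ∀ (fuel : Nat) (hi : Int), 1 ≤ hi → limit + 1 ≤ hi + (fuel : Int) →
      hi ≤ pvGallop limit s hi fuel ∧ limit < polygonal s (pvGallop limit s hi fuel) := by
  intro fuel
  induction fuel with
  | zero =>
    intro hi h1 h2
    have := pvPolygonal_ge s hi hs h1
    simp only [pvGallop]
    constructor
    · omega
    · omega
  | succ f ih =>
    intro hi h1 h2
    by_cases h : polygonal s hi ≤ limit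
    · have hge := pvPolygonal_ge s hi hs h1
      have := ih (hi * 2) (by omega) (by push_cast at h2 ⊢; omega)
      simp only [pvGallop, if_pos h]
      exact ⟨by omega, this.2⟩
    · simp only [pvGallop, if_neg h]
      exact ⟨le_refl _, by omega⟩

-- bisection correctness: from the invariant P lo ≤ limit < P hi, lo < hi, the result K
-- satisfies 1 ≤ K (if 1 ≤ lo), P K ≤ limit and limit < P (K+1)
lemma pvBisect_spec (limit s : Int) :
    ∀ (lo hi : Int), 1 ≤ lo → lo < hi → polygonal s lo ≤ limit → limit < polygonal s hi →
      1 ≤ pvBisect limit s lo hi ∧ polygonal s (pvBisect limit s lo hi) ≤ limit ∧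
        limit < polygonal s (pvBisect limit s lo hi + 1) := by
  intro lo hi
  induction lo, hi using pvBisect.induct limit s with
  | case1 lo hi h mid hm ih =>
    intro h1 hlt hlo hhi
    have hb := PySem.Int.floordiv_two_mid_bounds (lo := lo + 1) (hi := hi - 1) (by omega)
    have he : lo + 1 + (hi - 1) = lo + hi := by ring
    rw [he] at hb
    have hb2 : lo + 1 ≤ mid ∧ mid ≤ hi - 1 := hb
    rw [pvBisect, dif_pos h, if_pos hm]
    exact ih (by omega) (by omega) hm hhi
  | case2 lo hi h mid hm ih =>
    intro h1 hlt hlo hhi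
    have hb := PySem.Int.floordiv_two_mid_bounds (lo := lo + 1) (hi := hi - 1) (by omega)
    have he : lo + 1 + (hi - 1) = lo + hi := by ring
    rw [he] at hb
    have hb2 : lo + 1 ≤ mid ∧ mid ≤ hi - 1 := hb
    rw [pvBisect, dif_pos h, if_neg hm]
    exact ih h1 (by omega) hlo (by omega)
  | case3 lo hi h =>
    intro h1 hlt hlo hhi
    rw [pvBisect, dif_neg h]
    have : hi = lo + 1 := by omega
    exact ⟨h1, hlo, by rw [← this]; exact hhi⟩

-- A's scan loop equals the bounded fold over range k .. K (exclusive K+1)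
lemma pvLoopA_eq_range (limit s K : Int) (hs : 2 ≤ s)
    (hK : polygonal s K ≤ limit) (hK1 : limit < polygonal s (K + 1)) :
    ∀ (fuel : Nat) (k : Int) (d : PySem.Dict Int (PySem.Set Int)),
      1 ≤ k → k ≤ K + 1 → (K + 1 - k).toNat < fuel →
      pvLoopA limit s d k fuel =
        (PySem.List.pyRange k (K + 1) 1).foldl
          (fun d k => d.modify (polygonal s k) PySem.Set.empty (fun st => PySem.Set.add st s)) d := by
  intro fuel
  induction fuel with
  | zero => intro k d _ _ hf; omega
  | succ f ih =>
    intro k d h1 h2 hf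
    by_cases hk : k = K + 1
    · subst hk
      rw [PySem.List.pyRange_one_eq_nil (by omega)]
      simp only [pvLoopA, if_pos (by omega : polygonal s (K+1) > limit), List.foldl_nil]
    · have hkK : k ≤ K := by omega
      have hle : polygonal s k ≤ limit := le_trans (pvPolygonal_mono s hs h1 hkK) hK
      rw [PySem.List.pyRange_one_cons (by omega)]
      simp only [pvLoopA, if_neg (by omega : ¬ polygonal s k > limit), List.foldl_cons]
      exact ih (k + 1) _ (by omega) (by omega) (by omega)

-- per-s step equality under the precondition
lemma pvStep_eq (limit s : Int) (hpre : limit ≤ 0 ∨ 2 ≤ s)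
    (d : PySem.Dict Int (PySem.Set Int)) :
    pvLoopA limit s d 1 (limit.toNat + 2) =
      (if polygonal s 1 > limit then d
       else
         let hi := pvGallop limit s 2 (limit.toNat + 2)
         let K := pvBisect limit s 1 hi
         (PySem.List.pyRange 1 (K + 1) 1).foldl
           (fun d k => d.modify (polygonal s k) PySem.Set.empty (fun st => PySem.Set.add st s)) d) := by
  by_cases hbr : polygonal s 1 > limit
  · rw [if_pos hbr]
    simp only [pvLoopA, if_pos hbr]
  · rw [if_neg hbr]
    have hs : 2 ≤ s := by
      rcases hpre with h | h
      · exfalso; rw [pvPolygonal_one] at hbr; omega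
      · exact h
    have hlim : 1 ≤ limit := by rw [pvPolygonal_one] at hbr; omega
    obtain ⟨hhi2, hhiP⟩ := pvGallop_spec limit s hs (limit.toNat + 2) 2 (by omega) (by omega)
    set hi := pvGallop limit s 2 (limit.toNat + 2) with hhi
    obtain ⟨hK1, hKle, hKgt⟩ := pvBisect_spec limit s 1 hi (le_refl 1) (by omega)
      (by rw [pvPolygonal_one]; omega) hhiP
    set K := pvBisect limit s 1 hi with hKdef
    have hKb : K ≤ limit := le_trans (pvPolygonal_ge s K hs hK1) hKle
    exact pvLoopA_eq_range limit s K hs hKle hKgt (limit.toNat + 2) 1 d (le_refl 1)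
      (by omega) (by omega)

-- ===== VERDICT =====
theorem build_poly_map_spec : Claim_equal_build_poly_map := by
  intro limit s_range _hdom hpre
  unfold Spec_build_poly_map build_poly_map build_poly_map_alt
  congr 1
  apply PySem.List.foldl_congr_mem
  intro d s hmem
  exact pvStep_eq limit s (by rcases hpre with h | h; exact Or.inl h; exact Or.inr (h s hmem)) d
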